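-- pv_equiv track=rewrite | github.com/jonmcurry/837p_claims_processor | src/core/caching/intelligent_cache_manager.py | _key_matches_pattern
-- ===== SOURCE A (Python) =====
-- def _key_matches_pattern(key: str, pattern: str) -> bool:
--     """Check if key matches pattern."""
--     key_parts = key.split(':')
--     pattern_parts = pattern.split(':')
--
--     if len(key_parts) != len(pattern_parts):
--         return False
--
--     for key_part, pattern_part in zip(key_parts, pattern_parts):
--         if pattern_part != '*' and pattern_part != key_part:
--             return False
--
--     return True
-- ===== SOURCE B (Python) =====
-- def _key_matches_pattern(key: str, pattern: str) -> bool: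
--     """Two-pointer scan over key and pattern; no intermediate lists are built."""
--     i, j, n, m = 0, 0, len(key), len(pattern)
--     while True:
--         if j < m and pattern[j] == '*' and (j + 1 == m or pattern[j + 1] == ':'):
--             # wildcard segment: skip the rest of the current key segment
--             j += 1
--             while i < n and key[i] != ':':
--                 i += 1
--         else:
--             # literal segment: compare character by character up to ':' or end
--             while j < m and pattern[j] != ':':
--                 if i == n or key[i] != pattern[j]:
--                     return False
--                 i += 1
--                 j += 1
--             if i < n and key[i] != ':':
--                 return False
--         # segment boundary: both ended, one ended, or both at ':'
--         if i == n and j == m: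
--             return True
--         if i == n or j == m:
--             return False
--         i += 1
--         j += 1
-- ===== Notes on version B (the rewrite author's own statement) =====
-- stated objective: alternative
-- what changed: A splits both strings on ':' into lists and compares them segment-by-segment with zip; B is a single two-pointer scan over the raw strings that matches literal segments character by character and skips key segments on a '*' pattern segment, building no intermediate lists.
import Mathlib
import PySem

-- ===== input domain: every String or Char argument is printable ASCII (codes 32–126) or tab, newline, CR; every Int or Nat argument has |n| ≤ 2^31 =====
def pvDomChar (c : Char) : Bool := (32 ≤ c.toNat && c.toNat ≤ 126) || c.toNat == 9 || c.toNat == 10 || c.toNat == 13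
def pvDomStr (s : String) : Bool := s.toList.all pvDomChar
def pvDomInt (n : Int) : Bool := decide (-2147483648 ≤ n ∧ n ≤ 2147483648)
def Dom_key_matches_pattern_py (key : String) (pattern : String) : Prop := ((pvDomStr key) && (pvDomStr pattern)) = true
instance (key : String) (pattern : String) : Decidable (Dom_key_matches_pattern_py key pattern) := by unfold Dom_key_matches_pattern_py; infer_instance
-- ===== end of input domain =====

-- B replaces A's split-on-colon + zip comparison by a single two-pointer scan over the raw
-- strings (no intermediate lists); objective: alternative algorithm of similar cost.


-- ===== PORT A =====
-- key.split(':') / pattern.split(':') ported as PySem.Chars.splitOn on the char lists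
-- (exact: the separator ":" is nonempty); the for/zip loop with early 'return False' is List.all.
def key_matches_pattern_py (key : String) (pattern : String) : Bool :=
  let key_parts := PySem.Chars.splitOn key.toList [':']
  let pattern_parts := PySem.Chars.splitOn pattern.toList [':']
  if key_parts.length ≠ pattern_parts.length then false
  else (key_parts.zip pattern_parts).all (fun kp => kp.2 == ['*'] || kp.2 == kp.1)

-- ===== PORT B =====
-- Source B's state machine: bMatch = top of the outer loop (segment start), bLit = the literal
-- inner loop plus the boundary block, bBound = the boundary block; the two index pointers
-- i, j of Source B become the two list suffixes.
def bSkipSeg : List Char → List Char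
  | [] => []
  | c :: rest => if c = ':' then c :: rest else bSkipSeg rest

def bIsWild : List Char → Bool
  | [] => false
  | c :: rest => c == '*' && (match rest with | [] => true | e :: _ => e == ':')

mutual
def bMatch (k p : List Char) : Bool :=
  if bIsWild p then bBound (bSkipSeg k) p.tail else bLit k p
termination_by (p.length, 2)
decreasing_by
  all_goals
    first
    | exact Prod.Lex.right _ (by omega)
    | (cases p with
       | nil => exact Prod.Lex.right _ (by omega)
       | cons d p' => exact Prod.Lex.left _ _ (by simp))

def bBound (k p : List Char) : Bool :=
  match k, p with
  | [], [] => true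
  | _ :: k', _ :: p' => bMatch k' p'
  | _, _ => false
termination_by (p.length, 1)

def bLit (k p : List Char) : Bool :=
  match k, p with
  | [], [] => true
  | [], _ :: _ => false
  | _ :: _, [] => false
  | c :: k', d :: p' =>
    if d = ':' then (if c = ':' then bMatch k' p' else false)
    else (if c = d then bLit k' p' else false)
termination_by (p.length, 0)
end

def key_matches_pattern_py_alt (key : String) (pattern : String) : Bool :=
  bMatch key.toList pattern.toList

-- ===== PRECONDITION & SPEC =====
def Spec_key_matches_pattern_py (key : String) (pattern : String) (out : Bool) : Prop := out = key_matches_pattern_py_alt key pattern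
instance (key : String) (pattern : String) (out : Bool) : Decidable (Spec_key_matches_pattern_py key pattern out) := by unfold Spec_key_matches_pattern_py; infer_instance

-- ===== CLAIM (what is proved, stated in full; the proofs are below) =====
def Claim_equal_key_matches_pattern_py : Prop := ∀ (key : String) (pattern : String), Dom_key_matches_pattern_py key pattern → Spec_key_matches_pattern_py key pattern (key_matches_pattern_py key pattern)

-- ===== LEMMAS AND PROOFS =====

-- unfolding equations of the mutual well-founded definitions
theorem bBound_nil_nil : bBound [] [] = true := by rw [bBound]
theorem bBound_nil_cons (b : Char) (p' : List Char) : bBound [] (b::p') = false := by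
  rw [bBound]; all_goals (intros; simp_all)
theorem bBound_cons_nil (a : Char) (k' : List Char) : bBound (a::k') [] = false := by
  rw [bBound]; all_goals (intros; simp_all)
theorem bBound_cons_cons (a : Char) (k' : List Char) (b : Char) (p' : List Char) :
    bBound (a::k') (b::p') = bMatch k' p' := by rw [bBound]
theorem bLit_nil_nil : bLit [] [] = true := by rw [bLit]
theorem bLit_nil_cons (b : Char) (p' : List Char) : bLit [] (b::p') = false := by
  rw [bLit]; all_goals (intros; simp_all)
theorem bLit_cons_nil (a : Char) (k' : List Char) : bLit (a::k') [] = false := by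
  rw [bLit]; all_goals (intros; simp_all)
theorem bLit_cons_cons (c : Char) (k' : List Char) (d : Char) (p' : List Char) :
    bLit (c::k') (d::p') = (if d = ':' then (if c = ':' then bMatch k' p' else false)
    else (if c = d then bLit k' p' else false)) := by rw [bLit]
theorem bMatch_eq (k p : List Char) :
    bMatch k p = if bIsWild p then bBound (bSkipSeg k) p.tail else bLit k p := by rw [bMatch]

-- proof-side structural model of Python's split(':')
def mySplit : List Char → List (List Char)
  | [] => [[]]
  | c :: cs =>
    if c = ':' then [] :: mySplit cs
    else match mySplit cs with
         | [] => [[c]]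
         | h :: t => (c :: h) :: t

theorem mySplit_ne_nil (s : List Char) : mySplit s ≠ [] := by
  induction s with
  | nil => simp [mySplit]
  | cons c cs ih =>
    simp only [mySplit]
    split_ifs
    · simp
    · cases h : mySplit cs <;> simp

theorem mySplit_cons_colon (s : List Char) : mySplit (':' :: s) = [] :: mySplit s := by
  simp [mySplit]

theorem mySplit_cons_ne (c : Char) (s : List Char) (hc : c ≠ ':') :
    mySplit (c :: s) = (c :: (mySplit s).headI) :: (mySplit s).tail := by
  simp only [mySplit, if_neg hc]
  cases hm : mySplit s with
  | nil => exact absurd hm (mySplit_ne_nil s)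
  | cons h t => simp

def consHead (pre : List Char) : List (List Char) → List (List Char)
  | [] => [pre]
  | h :: t => (pre ++ h) :: t

theorem splitOn_go_eq (fuel : Nat) :
    ∀ (l cur : List Char) (acc : List (List Char)), l.length ≤ fuel →
      PySem.Chars.splitOn.go [':'] fuel l cur acc
        = acc.reverse ++ consHead cur.reverse (mySplit l) := by
  induction fuel with
  | zero =>
    intro l cur acc h
    have : l = [] := List.length_eq_zero_iff.mp (Nat.le_zero.mp h)
    subst this
    simp [PySem.Chars.splitOn.go, mySplit, consHead]
  | succ fuel ih =>
    intro l cur acc h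
    cases l with
    | nil => simp [PySem.Chars.splitOn.go, mySplit, consHead]
    | cons c rest =>
      have hrest : rest.length ≤ fuel := by simpa using Nat.lt_succ_iff.mp (by simpa using h)
      by_cases hc : c = ':'
      · subst hc
        rw [show PySem.Chars.splitOn.go [':'] (fuel+1) (':' :: rest) cur acc
              = PySem.Chars.splitOn.go [':'] fuel rest [] (cur.reverse :: acc) by
            simp [PySem.Chars.splitOn.go, List.isPrefixOf]]
        rw [ih rest [] (cur.reverse :: acc) hrest, mySplit_cons_colon]
        cases hm : mySplit rest with
        | nil => exact absurd hm (mySplit_ne_nil rest)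
        | cons h' t' => simp [consHead]
      · rw [show PySem.Chars.splitOn.go [':'] (fuel+1) (c :: rest) cur acc
              = PySem.Chars.splitOn.go [':'] fuel rest (c :: cur) acc by
            simp [PySem.Chars.splitOn.go, List.isPrefixOf]
            intro h'; exact absurd h'.symm hc]
        rw [ih rest (c :: cur) acc hrest, mySplit_cons_ne c rest hc]
        cases hm : mySplit rest with
        | nil => exact absurd hm (mySplit_ne_nil rest)
        | cons h' t' => simp [consHead]

theorem splitOn_eq (s : List Char) : PySem.Chars.splitOn s [':'] = mySplit s := by
  rw [PySem.Chars.splitOn, splitOn_go_eq (s.length + 1) s [] [] (by omega)]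
  cases hm : mySplit s with
  | nil => exact absurd hm (mySplit_ne_nil s)
  | cons h t => simp [consHead]

-- the segment-wise comparison A performs
def segMatch : List (List Char) → List (List Char) → Bool
  | [], [] => true
  | a :: ks, b :: ps => (b == ['*'] || b == a) && segMatch ks ps
  | _, _ => false

theorem segMatch_nil_right (ks : List (List Char)) : segMatch ks [] = (ks == []) := by
  cases ks <;> simp [segMatch]

theorem segMatch_nil_left (ps : List (List Char)) : segMatch [] ps = (ps == []) := by
  cases ps <;> simp [segMatch]

theorem lenZip_eq_segMatch : ∀ (ks ps : List (List Char)),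
    (if ks.length ≠ ps.length then false
     else (ks.zip ps).all (fun kp => kp.2 == ['*'] || kp.2 == kp.1)) = segMatch ks ps := by
  intro ks
  induction ks with
  | nil => intro ps; cases ps <;> simp [segMatch]
  | cons a ks ih =>
    intro ps
    cases ps with
    | nil => simp [segMatch]
    | cons b ps =>
      rw [segMatch, ← ih ps]
      by_cases h : ks.length = ps.length
      · simp [h]
      · simp [h]

-- bLit's value expressed on the split segments: the first pair must be equal literally
def litMatch : List (List Char) → List (List Char) → Bool
  | a :: ks, b :: ps => (a == b) && segMatch ks ps
  | _, _ => false

-- wildcard cases of bMatch, by induction on the key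
theorem wild_end : ∀ k : List Char, bBound (bSkipSeg k) [] = segMatch (mySplit k) [['*']] := by
  intro k
  induction k with
  | nil => simp [bSkipSeg, bBound_nil_nil, mySplit, segMatch]
  | cons c k' ih =>
    by_cases hc : c = ':'
    · subst hc
      rw [mySplit_cons_colon]
      rw [show bSkipSeg (':' :: k') = ':' :: k' from by simp [bSkipSeg]]
      rw [bBound_cons_nil]
      simp [segMatch, segMatch_nil_right, mySplit_ne_nil k']
    · rw [mySplit_cons_ne c k' hc]
      rw [show bSkipSeg (c :: k') = bSkipSeg k' from by simp [bSkipSeg, hc]]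
      rw [ih]
      cases hm : mySplit k' with
      | nil => exact absurd hm (mySplit_ne_nil k')
      | cons h t => simp [segMatch]

theorem wild_mid (q : List Char)
    (hq : ∀ k, bMatch k q = segMatch (mySplit k) (mySplit q)) :
    ∀ k, bBound (bSkipSeg k) (':' :: q) = segMatch (mySplit k) (['*'] :: mySplit q) := by
  intro k
  induction k with
  | nil =>
    simp only [bSkipSeg, bBound_nil_cons, mySplit, segMatch]
    rw [segMatch_nil_left]
    simp [mySplit_ne_nil q]
  | cons c k' ih =>
    by_cases hc : c = ':'
    · subst hc
      rw [mySplit_cons_colon]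
      rw [show bSkipSeg (':' :: k') = ':' :: k' from by simp [bSkipSeg]]
      rw [bBound_cons_cons]
      rw [hq k']
      simp [segMatch]
    · rw [mySplit_cons_ne c k' hc]
      rw [show bSkipSeg (c :: k') = bSkipSeg k' from by simp [bSkipSeg, hc]]
      rw [ih]
      cases hm : mySplit k' with
      | nil => exact absurd hm (mySplit_ne_nil k')
      | cons h t => simp [segMatch]

-- the first pattern segment is ['*'] only when bIsWild fires
theorem head_ne_star (p : List Char) (hw : bIsWild p = false) : (mySplit p).headI ≠ ['*'] := by
  cases p with
  | nil => simp [mySplit]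
  | cons d p' =>
    by_cases hd : d = ':'
    · subst hd; rw [mySplit_cons_colon]; simp
    · rw [mySplit_cons_ne d p' hd]
      by_cases hs : d = '*'
      · subst hs
        cases p' with
        | nil => simp [bIsWild] at hw
        | cons e p'' =>
          have he : e ≠ ':' := by
            intro h; subst h; simp [bIsWild] at hw
          rw [mySplit_cons_ne e p'' he]
          simp
      · simp [hs]

-- with a non-wild first pattern segment, segMatch degenerates to litMatch
theorem seg_eq_lit (ks ps : List (List Char)) (hb : ps.headI ≠ ['*']) (hk : ks ≠ []) (hp : ps ≠ []) :
    segMatch ks ps = litMatch ks ps := by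
  cases ks with
  | nil => exact absurd rfl hk
  | cons a ks =>
    cases ps with
    | nil => exact absurd rfl hp
    | cons b ps =>
      simp only [List.headI] at hb
      have h1 : (b == ['*']) = false := by simp [hb]
      have h2 : (b == a) = (a == b) := by simp [beq_iff_eq]; exact eq_comm
      simp only [segMatch, litMatch, h1, Bool.false_or, h2]

-- main equivalence of the two-pointer machine with the segment-wise comparison
theorem bMain : ∀ n : Nat, ∀ p : List Char, p.length ≤ n →
    (∀ k, bLit k p = litMatch (mySplit k) (mySplit p)) ∧
    (∀ k, bMatch k p = segMatch (mySplit k) (mySplit p)) := by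
  intro n
  induction n with
  | zero =>
    intro p hp
    have hp0 : p = [] := List.length_eq_zero_iff.mp (Nat.le_zero.mp hp)
    subst hp0
    have hL : ∀ k, bLit k [] = litMatch (mySplit k) (mySplit []) := by
      intro k
      cases k with
      | nil => simp [bLit_nil_nil, litMatch, mySplit, segMatch]
      | cons c k' =>
        by_cases hc : c = ':'
        · subst hc
          rw [mySplit_cons_colon]
          simp only [bLit_cons_nil, mySplit, litMatch]
          rw [segMatch_nil_right]
          simp [mySplit_ne_nil k']
        · rw [mySplit_cons_ne c k' hc]
          simp [bLit_cons_nil, mySplit, litMatch]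
    refine ⟨hL, ?_⟩
    intro k
    rw [bMatch_eq]
    simp only [show bIsWild [] = false from rfl, Bool.false_eq_true, if_false]
    rw [hL k]
    exact (seg_eq_lit _ _ (by simp [mySplit]) (mySplit_ne_nil k) (mySplit_ne_nil [])).symm
  | succ n ih =>
    intro p hp
    have hL : ∀ k, bLit k p = litMatch (mySplit k) (mySplit p) := by
      intro k
      cases p with
      | nil => exact ((ih [] (by simp)).1 k)
      | cons d p' =>
        have hp' : p'.length ≤ n := by simpa using Nat.lt_succ_iff.mp (by simpa using hp)
        by_cases hd : d = ':'
        · subst hd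
          rw [mySplit_cons_colon]
          cases k with
          | nil =>
            simp only [bLit_nil_cons, mySplit, litMatch]
            rw [segMatch_nil_left]
            simp [mySplit_ne_nil p']
          | cons c k' =>
            by_cases hc : c = ':'
            · subst hc
              rw [mySplit_cons_colon]
              simp only [bLit_cons_cons, litMatch]
              rw [(ih p' hp').2 k']
              simp
            · rw [mySplit_cons_ne c k' hc]
              simp [bLit_cons_cons, hc, litMatch]
        · rw [mySplit_cons_ne d p' hd]
          cases k with
          | nil => simp [bLit_nil_cons, mySplit, litMatch]
          | cons c k' =>
            by_cases hc : c = ':'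
            · subst hc
              rw [mySplit_cons_colon]
              simp only [bLit_cons_cons, if_neg hd, litMatch]
              have hne : (':' : Char) ≠ d := fun h => hd h.symm
              simp [hne]
            · rw [mySplit_cons_ne c k' hc]
              simp only [bLit_cons_cons, if_neg hd]
              rw [(ih p' hp').1 k']
              cases hmk : mySplit k' with
              | nil => exact absurd hmk (mySplit_ne_nil k')
              | cons hk tk =>
                cases hmp : mySplit p' with
                | nil => exact absurd hmp (mySplit_ne_nil p')
                | cons hp2 tp =>
                  simp only [litMatch, List.headI, List.tail_cons]
                  by_cases hcd : c = d
                  · subst hcd; simp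
                  · simp [hcd]
    refine ⟨hL, ?_⟩
    intro k
    rw [bMatch_eq]
    by_cases hw : bIsWild p
    · simp only [hw, if_true]
      cases p with
      | nil => simp [bIsWild] at hw
      | cons d p' =>
        cases p' with
        | nil =>
          have hd : d = '*' := by simpa [bIsWild] using hw
          subst hd
          simp only [List.tail_cons]
          rw [show mySplit ['*'] = [['*']] from rfl]
          exact wild_end k
        | cons e q =>
          obtain ⟨hd, he⟩ : d = '*' ∧ e = ':' := by simpa [bIsWild] using hw
          subst hd; subst he
          simp only [List.tail_cons]
          rw [mySplit_cons_ne '*' (':' :: q) (by decide), mySplit_cons_colon]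
          simp only [List.headI, List.tail_cons]
          have hq : q.length ≤ n := by
            simp at hp; omega
          exact wild_mid q (fun k2 => (ih q hq).2 k2) k
    · simp only [Bool.not_eq_true] at hw
      simp only [hw, Bool.false_eq_true, if_false]
      rw [hL k]
      exact (seg_eq_lit _ _ (head_ne_star p hw) (mySplit_ne_nil k) (mySplit_ne_nil p)).symm

-- bridge from segMatch equality to the ports
theorem ports_agree (key pattern : String) :
    key_matches_pattern_py key pattern = key_matches_pattern_py_alt key pattern := by
  unfold key_matches_pattern_py key_matches_pattern_py_alt
  rw [splitOn_eq, splitOn_eq, lenZip_eq_segMatch]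
  exact ((bMain pattern.toList.length pattern.toList le_rfl).2 key.toList).symm

-- ===== VERDICT (by name: the statement is the Claim_ definition above) =====
theorem key_matches_pattern_py_spec : Claim_equal_key_matches_pattern_py := by
  intro key pattern _
  unfold Spec_key_matches_pattern_py
  exact ports_agree key pattern
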